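-- pv_equiv track=rewrite | github.com/wesleyromey/wr_public_rep | humanReadableEncryption/main.py | changeLetterOrderPerWord
-- ===== SOURCE A (Python) =====
-- ALPHA_NUMERIC_SET = "abcdefghijklmnopqrstuvwxyzABCDEFGHIJKLMNOPQRSTUVWXYZ0123456789"
--
-- def applyNewOrdering(ordering: list, strOrig: str) -> str:
--     def solveOneCycle(cycleNum: int, ordering: list, strOrig: str) -> str:
--         iMin = cycleNum * (max(ordering) + 1)
--         iMax = min(iMin + max(ordering), len(strOrig) - 1)
--         strOut = ""
--         for i in ordering:
--             iMod = i + iMin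
--             if iMod < iMin or iMod > iMax:
--                 continue
--             strOut += strOrig[iMod]
--         return strOut
--     # Applies a new ordering to a particular word,
--     #   NOTE: All indices from 0 to len(strOrig)-1 MUST be included in ordering at least once each
--     #   If len(strOrig) > len(ordering), then apply ordering cyclically
--     strOut = ""
--     assert len(ordering) > 0 and len(strOrig) > 0
--     numCycles = (len(strOrig) - 1) // max(ordering) + 1
--     for cycleNum in range(numCycles):
--         strOut += solveOneCycle(cycleNum, ordering, strOrig)
--     return strOut
--
-- def changeLetterOrderPerWord(ordering: list, strOrig: str) -> str:
--     # A word is any set of alphanumeric characters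
--     #   grouped together. The characters included here
--     #   are defined in ALPHA_NUMERIC_SET
--     # ordering: Modify the ordering of each word.
--     #   If len(ordering) < len(word), then this the order cycles for all letters in the word
--     i0, i1 = 0, 0
--     strOut = ""
--     while i1 < len(strOrig):
--         if strOrig[i1] in ALPHA_NUMERIC_SET:
--             i1 += 1
--         elif strOrig[i0] in ALPHA_NUMERIC_SET:
--             strOut += applyNewOrdering(ordering, strOrig[i0:i1])
--             i0 = i1
--         else:
--             strOut += strOrig[i0]
--             i0 += 1
--             i1 += 1
--     if i0 < len(strOrig):
--         strOut += applyNewOrdering(ordering, strOrig[i0:i1])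
--     return strOut
-- ===== SOURCE B (Python) =====
-- ALPHA_NUMERIC_SET = "abcdefghijklmnopqrstuvwxyzABCDEFGHIJKLMNOPQRSTUVWXYZ0123456789"
--
-- def applyNewOrdering(ordering: list, strOrig: str) -> str:
--     def solveOneCycle(cycleNum: int, ordering: list, strOrig: str) -> str:
--         iMin = cycleNum * (max(ordering) + 1)
--         iMax = min(iMin + max(ordering), len(strOrig) - 1)
--         strOut = ""
--         for i in ordering:
--             iMod = i + iMin
--             if iMod < iMin or iMod > iMax:
--                 continue
--             strOut += strOrig[iMod]
--         return strOut
--     strOut = ""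
--     assert len(ordering) > 0 and len(strOrig) > 0
--     numCycles = (len(strOrig) - 1) // max(ordering) + 1
--     for cycleNum in range(numCycles):
--         strOut += solveOneCycle(cycleNum, ordering, strOrig)
--     return strOut
--
-- def changeLetterOrderPerWord(ordering: list, strOrig: str) -> str:
--     # Single forward fold over the characters: buffer the current alphanumeric
--     # run, flush it through applyNewOrdering when a separator arrives (and once
--     # at the end), pass separators through verbatim. No index arithmetic.
--     out = []
--     word = []
--     for ch in strOrig:
--         if ch in ALPHA_NUMERIC_SET:
--             word.append(ch)
--         else:
--             if word:
--                 out.append(applyNewOrdering(ordering, "".join(word)))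
--                 word = []
--             out.append(ch)
--     if word:
--         out.append(applyNewOrdering(ordering, "".join(word)))
--     return "".join(out)
-- ===== Notes on version B (the rewrite author's own statement) =====
-- stated objective: simpler
-- what changed: Replaced A's two-pointer index scan with deferred-window flushing (and its separate post-loop flush reached via an extra no-consume iteration) by a single character fold that buffers the current word and flushes it through the unchanged applyNewOrdering helper at each separator; no index arithmetic or slicing remains.
-- outside the precondition, e.g. on changeLetterOrderPerWord([], 'ab'): A raises AssertionError, B raises AssertionError; on changeLetterOrderPerWord([0], 'a b'): A raises ZeroDivisionError, B raises ZeroDivisionError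
import Mathlib
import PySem

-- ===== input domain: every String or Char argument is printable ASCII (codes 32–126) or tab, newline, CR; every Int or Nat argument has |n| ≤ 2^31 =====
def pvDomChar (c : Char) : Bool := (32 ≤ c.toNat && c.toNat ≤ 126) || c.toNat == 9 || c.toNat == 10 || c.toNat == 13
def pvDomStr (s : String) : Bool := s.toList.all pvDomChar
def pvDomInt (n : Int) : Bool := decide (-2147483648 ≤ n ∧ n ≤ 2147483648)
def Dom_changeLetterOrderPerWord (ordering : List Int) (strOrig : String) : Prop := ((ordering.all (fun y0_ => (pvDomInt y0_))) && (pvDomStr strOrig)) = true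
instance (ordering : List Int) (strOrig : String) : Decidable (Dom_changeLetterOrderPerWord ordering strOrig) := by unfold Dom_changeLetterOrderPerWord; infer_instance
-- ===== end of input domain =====

-- B replaces A's two-pointer index scan by a single character fold carrying a word buffer
-- (objective: simpler/idiomatic; same word-reordering helper, same result).

-- ===== PORT A =====
-- ALPHA_NUMERIC_SET; 'ch in ALPHA_NUMERIC_SET' for a single character is list membership (exact)
def pvAlnum : List Char := "abcdefghijklmnopqrstuvwxyzABCDEFGHIJKLMNOPQRSTUVWXYZ0123456789".toList

-- helper solveOneCycle of applyNewOrdering (on List Char).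
-- strOrig[iMod]: whenever the branch is reached, iMin ≤ iMod ≤ iMax ≤ len-1 with 0 ≤ iMin,
-- so the index is in range and the pyGetD default is unreachable (exact).
def solveOneCycleL (cycleNum : Int) (ordering : List Int) (w : List Char) : List Char :=
  let mx := (PySem.List.max? ordering (fun y => y)).getD 0
  let iMin := cycleNum * (mx + 1)
  let iMax := min (iMin + mx) ((w.length : Int) - 1)
  ordering.foldl (fun acc i =>
    let iMod := i + iMin
    if iMod < iMin ∨ iMod > iMax then acc
    else acc ++ [PySem.List.pyGetD w iMod ' ']) []

-- helper applyNewOrdering (on List Char); both Pythons contain this same helper verbatim.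
-- ordering = [] (Python: AssertionError) and max(ordering) = 0 (Python: ZeroDivisionError)
-- are excluded by Pre_ whenever a word exists; the port returns [] there.
def applyNewOrderingL (ordering : List Int) (w : List Char) : List Char :=
  match PySem.List.max? ordering (fun y => y) with
  | none => []
  | some mx =>
    if mx = 0 then []
    else
      let numCycles := PySem.Int.floordiv ((w.length : Int) - 1) mx + 1
      (PySem.List.pyRange 0 numCycles 1).foldl
        (fun acc cycleNum => acc ++ solveOneCycleL cycleNum ordering w) []

-- A's while loop: state (i0, i1, strOut); fuel 2*len+1 suffices (the loop's own measure,
-- see loopA lemmas below); strOrig[i1]/strOrig[i0] have 0 ≤ i0 ≤ i1 < len throughout, so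
-- the getD default is unreachable (exact).
def loopA (ordering : List Int) (s : List Char) :
    Nat → Nat → Nat → List Char → Nat × Nat × List Char
  | 0, i0, i1, out => (i0, i1, out)
  | fuel + 1, i0, i1, out =>
    if i1 < s.length then
      if s.getD i1 ' ' ∈ pvAlnum then
        loopA ordering s fuel i0 (i1 + 1) out
      else if s.getD i0 ' ' ∈ pvAlnum then
        loopA ordering s fuel i1 i1
          (out ++ applyNewOrderingL ordering (PySem.List.slice s (some (i0 : Int)) (some (i1 : Int))))
      else
        loopA ordering s fuel (i0 + 1) (i1 + 1) (out ++ [s.getD i0 ' '])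
    else (i0, i1, out)

def changeLetterOrderPerWord (ordering : List Int) (strOrig : String) : String :=
  let s := strOrig.toList
  let r := loopA ordering s (2 * s.length + 1) 0 0 []
  -- trailing 'if i0 < len(strOrig): strOut += applyNewOrdering(ordering, strOrig[i0:i1])'
  String.ofList (if r.1 < s.length then
      r.2.2 ++ applyNewOrderingL ordering (PySem.List.slice s (some (r.1 : Int)) (some (r.2.1 : Int)))
    else r.2.2)

-- ===== PORT B =====
-- one fold step of Source B's loop: buffer alphanumeric characters, flush the buffer through
-- applyNewOrdering at a separator, pass the separator through
def stepB (ordering : List Int) (st : List Char × List Char) (ch : Char) : List Char × List Char :=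
  if ch ∈ pvAlnum then (st.1, st.2 ++ [ch])
  else if st.2.isEmpty then (st.1 ++ [ch], [])
  else (st.1 ++ applyNewOrderingL ordering st.2 ++ [ch], [])

def changeLetterOrderPerWord_alt (ordering : List Int) (strOrig : String) : String :=
  let st := strOrig.toList.foldl (stepB ordering) ([], [])
  -- final flush of a pending word, then ''.join
  String.ofList (if st.2.isEmpty then st.1 else st.1 ++ applyNewOrderingL ordering st.2)

-- ===== PRECONDITION & SPEC =====
-- Pre_ excludes exactly the inputs where A raises: a string containing at least one
-- alphanumeric character together with an empty ordering (AssertionError) or an ordering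
-- whose maximum is 0 (ZeroDivisionError). B raises identically there (same helper).
def Pre_changeLetterOrderPerWord (ordering : List Int) (strOrig : String) : Prop :=
  strOrig.toList.any (fun c => pvAlnum.contains c) = true →
    (ordering ≠ [] ∧ PySem.List.max? ordering (fun y => y) ≠ some 0)
instance (ordering : List Int) (strOrig : String) : Decidable (Pre_changeLetterOrderPerWord ordering strOrig) := by
  unfold Pre_changeLetterOrderPerWord; infer_instance

def pvWitness_changeLetterOrderPerWord : List Int × String := ([1, 0], "ab c!")

def Spec_changeLetterOrderPerWord (ordering : List Int) (strOrig : String) (out : String) : Prop := out = changeLetterOrderPerWord_alt ordering strOrig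
instance (ordering : List Int) (strOrig : String) (out : String) : Decidable (Spec_changeLetterOrderPerWord ordering strOrig out) := by unfold Spec_changeLetterOrderPerWord; infer_instance

-- ===== CLAIM (what is proved, stated in full; the proofs are below) =====
def Claim_equal_changeLetterOrderPerWord : Prop := ∀ (ordering : List Int) (strOrig : String), Dom_changeLetterOrderPerWord ordering strOrig → Pre_changeLetterOrderPerWord ordering strOrig → Spec_changeLetterOrderPerWord ordering strOrig (changeLetterOrderPerWord ordering strOrig)

-- ===== LEMMAS AND PROOFS =====

-- the trailing flush of port A, on drop/take form of the slice
def pyFinish (ordering : List Int) (s : List Char) (r : Nat × Nat × List Char) : List Char :=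
  if r.1 < s.length then
    r.2.2 ++ applyNewOrderingL ordering ((s.drop r.1).take (r.2.1 - r.1))
  else r.2.2

-- the final flush of port B
def bFinish (ordering : List Int) (st : List Char × List Char) : List Char :=
  if st.2.isEmpty then st.1 else st.1 ++ applyNewOrderingL ordering st.2

-- simulation: A's loop from state (i0, i1, out), whose pending window s[i0:i1] is all
-- alphanumeric, computes the same final string as B's fold over the remaining characters
-- started with that window as word buffer
lemma loopA_eq_foldB (ordering : List Int) (s : List Char) :
    ∀ (fuel i0 i1 : Nat) (out : List Char),
      i0 ≤ i1 → i1 ≤ s.length →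
      2 * (s.length - i1) + (if i0 < i1 then 1 else 0) + 1 ≤ fuel →
      (∀ j, i0 ≤ j → j < i1 → s.getD j ' ' ∈ pvAlnum) →
      pyFinish ordering s (loopA ordering s fuel i0 i1 out)
        = bFinish ordering ((s.drop i1).foldl (stepB ordering) (out, (s.drop i0).take (i1 - i0))) := by
  intro fuel
  induction fuel with
  | zero => intro i0 i1 out h01 h1n hfuel hinv; omega
  | succ fuel ih =>
    intro i0 i1 out h01 h1n hfuel hinv
    by_cases h1 : i1 < s.length
    · have hdrop : s.drop i1 = s[i1] :: s.drop (i1 + 1) := List.drop_eq_getElem_cons h1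
      have hgetd : s.getD i1 ' ' = s[i1] := List.getD_eq_getElem s ' ' h1
      by_cases hc : s.getD i1 ' ' ∈ pvAlnum
      · -- alphanumeric: extend the window
        have hpend : (s.drop i0).take (i1 + 1 - i0) = (s.drop i0).take (i1 - i0) ++ [s[i1]] := by
          have : i1 + 1 - i0 = (i1 - i0) + 1 := by omega
          rw [this, List.take_add_one]
          have : (s.drop i0)[i1 - i0]? = some s[i1] := by
            rw [List.getElem?_drop]
            have : i0 + (i1 - i0) = i1 := by omega
            simp [this]
          simp [this]
        have hun : loopA ordering s (fuel + 1) i0 i1 out = loopA ordering s fuel i0 (i1 + 1) out := by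
          simp only [loopA]; rw [if_pos h1, if_pos hc]
        rw [hun, ih i0 (i1 + 1) out (by omega) (by omega)
            (by split_ifs at hfuel ⊢ <;> omega)
            (by intro j hj0 hj1
                rcases Nat.lt_or_ge j i1 with h | h
                · exact hinv j hj0 h
                · have : j = i1 := by omega
                  subst this; exact hc)]
        rw [hdrop, List.foldl_cons, hpend]
        rw [hgetd] at hc
        rw [show stepB ordering (out, (s.drop i0).take (i1 - i0)) s[i1]
              = (out, (s.drop i0).take (i1 - i0) ++ [s[i1]]) from by simp [stepB, hc]]
      · by_cases hd : s.getD i0 ' ' ∈ pvAlnum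
        · -- separator after a nonempty window: flush the word
          have h01' : i0 < i1 := by
            rcases Nat.lt_or_ge i0 i1 with h | h
            · exact h
            · have : i0 = i1 := by omega
              subst this; exact absurd hd hc
          have hpendne : ((s.drop i0).take (i1 - i0)).isEmpty = false := by
            simp
            omega
          have hun : loopA ordering s (fuel + 1) i0 i1 out
              = loopA ordering s fuel i1 i1
                  (out ++ applyNewOrderingL ordering
                    (PySem.List.slice s (some (i0 : Int)) (some (i1 : Int)))) := by
            simp only [loopA]; rw [if_pos h1, if_neg hc, if_pos hd]
          rw [hun, PySem.List.slice_natCast,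
              ih i1 i1 _ le_rfl (by omega)
                (by split_ifs at hfuel ⊢ <;> omega)
                (fun j hj0 hj1 => absurd hj1 (by omega))]
          simp only [Nat.sub_self, List.take_zero]
          rw [hdrop, List.foldl_cons, List.foldl_cons]
          rw [hgetd] at hc
          simp [stepB, hc, hpendne]
        · -- separator with empty window: i0 = i1, emit the character
          have h01' : i0 = i1 := by
            rcases Nat.lt_or_ge i0 i1 with h | h
            · exact absurd (hinv i0 le_rfl h) hd
            · omega
          subst h01'
          have hun : loopA ordering s (fuel + 1) i0 i0 out
              = loopA ordering s fuel (i0 + 1) (i0 + 1) (out ++ [s.getD i0 ' ']) := by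
            simp only [loopA]; rw [if_pos h1, if_neg hc, if_neg hd]
          rw [hun, ih (i0 + 1) (i0 + 1) _ le_rfl (by omega)
                (by split_ifs at hfuel ⊢ <;> omega)
                (fun j hj0 hj1 => absurd hj1 (by omega))]
          simp only [Nat.sub_self, List.take_zero]
          rw [hdrop, List.foldl_cons]
          rw [hgetd] at hc ⊢
          simp [stepB, hc]
    · -- loop exit: i1 = len
      have hret : loopA ordering s (fuel + 1) i0 i1 out = (i0, i1, out) := by
        simp only [loopA]; rw [if_neg h1]
      have h1e : i1 = s.length := by omega
      rw [hret]
      subst h1e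
      have hpend : (s.drop i0).take (s.length - i0) = s.drop i0 := by
        apply List.take_of_length_le
        simp
      rw [List.drop_length, List.foldl_nil, hpend]
      unfold pyFinish bFinish
      by_cases h0 : i0 < s.length
      · rw [if_pos h0]
        have : (s.drop i0).isEmpty = false := by
          simp
          omega
        rw [this]
        simp [hpend]
      · rw [if_neg h0]
        have : (s.drop i0).isEmpty = true := by
          simp [List.isEmpty_iff]
          omega
        rw [this]
        simp

-- ===== VERDICT (by name: the statement is the Claim_ definition above) =====
theorem changeLetterOrderPerWord_spec : Claim_equal_changeLetterOrderPerWord := by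
  intro ordering strOrig _ _
  unfold Spec_changeLetterOrderPerWord
  have h := loopA_eq_foldB ordering strOrig.toList (2 * strOrig.toList.length + 1) 0 0 []
    le_rfl (Nat.zero_le _) (by simp) (fun j hj0 hj1 => absurd hj1 (by omega))
  unfold pyFinish bFinish at h
  simp only [List.drop_zero, Nat.sub_zero, List.take_zero] at h
  unfold changeLetterOrderPerWord changeLetterOrderPerWord_alt
  simp only [PySem.List.slice_natCast]
  exact congrArg String.ofList h
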